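-- pv_equiv track=rewrite | github.com/Eugenelcc/Data-Structure-Algorithm-Assignments | Part A/Topic 4 Sort/Practical 4 Q3A.py | builtin_sort
-- ===== SOURCE A (Python) =====
-- def builtin_sort(words_list):
--     h_list = []
--     others_list = []
--
--
--     for word in words_list:
--         if word.startswith('H'):
--             h_list.append(word)
--         else:
--             others_list.append(word)
--
--     return sorted(h_list) + sorted(others_list)
-- ===== SOURCE B (Python) =====
-- def builtin_sort(words_list):
--     return sorted(words_list, key=lambda w: (not w.startswith('H'), w))
-- ===== Notes on version B (the rewrite author's own statement) =====
-- stated objective: idiomatic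
-- what changed: Replaces the partition loop and two separate sorts with a single stable sort over a composite key (group flag, word): H-words sort first because False < True, and the full-word second key reproduces the lexicographic order within each group.
import Mathlib
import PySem

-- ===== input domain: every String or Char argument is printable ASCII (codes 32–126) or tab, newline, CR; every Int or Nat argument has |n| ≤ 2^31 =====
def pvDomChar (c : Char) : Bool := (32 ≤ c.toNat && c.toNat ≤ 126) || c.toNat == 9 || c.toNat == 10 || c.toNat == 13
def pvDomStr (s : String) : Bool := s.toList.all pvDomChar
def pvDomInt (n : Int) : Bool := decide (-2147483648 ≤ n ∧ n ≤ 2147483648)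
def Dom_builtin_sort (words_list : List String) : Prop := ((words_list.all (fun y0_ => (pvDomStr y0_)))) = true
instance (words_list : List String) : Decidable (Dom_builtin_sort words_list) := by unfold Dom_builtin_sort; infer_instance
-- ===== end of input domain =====

-- B replaces A's partition loop + two sorts by ONE stable sort on the composite key (group flag, word); equal on all inputs.

-- ===== PORT A =====
-- the partition loop: appends each word to h_list or others_list
def builtin_sort (words_list : List String) : List String :=
  let st := words_list.foldl
    (fun (acc : List String × List String) word =>
      if PySem.Str.startswith word "H" then (acc.1 ++ [word], acc.2)
      else (acc.1, acc.2 ++ [word]))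
    ([], [])
  PySem.List.sorted st.1 (fun x => x) ++ PySem.List.sorted st.2 (fun x => x)

-- ===== PORT B =====
def builtin_sort_alt (words_list : List String) : List String :=
  PySem.List.sorted2 words_list (fun w => !PySem.Str.startswith w "H") (fun w => w)

-- ===== PRECONDITION & SPEC =====
def Spec_builtin_sort (words_list : List String) (out : List String) : Prop := out = builtin_sort_alt words_list
instance (words_list : List String) (out : List String) : Decidable (Spec_builtin_sort words_list out) := by unfold Spec_builtin_sort; infer_instance

-- ===== CLAIM (what is proved, stated in full; the proofs are below) =====
def Claim_equal_builtin_sort : Prop := ∀ (words_list : List String), Dom_builtin_sort words_list → Spec_builtin_sort words_list (builtin_sort words_list)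

-- ===== LEMMAS AND PROOFS =====

-- the combined key B sorts by, as a value in the lexicographic order on Bool × String
def pvKey (w : String) : Lex (Bool × String) := toLex (!PySem.Str.startswith w "H", w)

theorem pvKey_injective : Function.Injective pvKey := by
  intro a b h
  have := congrArg (fun x => (ofLex x).2) h
  simpa [pvKey] using this

-- A's partition loop computes (filter p, filter !p) appended to the accumulators
theorem partition_foldl (p : String → Bool) (xs : List String) (h o : List String) :
    xs.foldl (fun (acc : List String × List String) word =>
        if p word then (acc.1 ++ [word], acc.2) else (acc.1, acc.2 ++ [word])) (h, o)
      = (h ++ xs.filter p, o ++ xs.filter (fun w => !p w)) := by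
  induction xs generalizing h o with
  | nil => simp
  | cons x t ih =>
    by_cases hx : p x <;> simp [List.foldl_cons, hx, ih]

-- sorted2 with a second key that is the element itself IS sorted by the lexicographic pair key
theorem sorted2_eq_sorted_lex (xs : List String) (k1 : String → Bool) :
    PySem.List.sorted2 xs k1 (fun w => w)
      = PySem.List.sorted xs (fun w => toLex (k1 w, w)) := by
  have h : (fun (a b : String) => decide (k1 a < k1 b) || (!decide (k1 b < k1 a) && decide (a < b)))
      = (fun (a b : String) => decide (toLex (k1 a, a) < toLex (k1 b, b))) := by
    funext a b
    by_cases h1 : k1 a < k1 b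
    · simp [h1, Prod.Lex.lt_iff]
    · by_cases h2 : k1 b < k1 a
      · have hne : ¬ (k1 a = k1 b) := fun h => by simp [h] at h2
        simp [h1, h2, Prod.Lex.lt_iff, hne]
      · have heq : k1 a = k1 b := le_antisymm (not_lt.mp h2) (not_lt.mp h1)
        simp [Prod.Lex.lt_iff, heq]
  show List.foldl (fun acc x => PySem.List.insertBy
      (fun (a b : String) => decide (k1 a < k1 b) || (!decide (k1 b < k1 a) && decide (a < b))) x acc) [] xs
    = List.foldl (fun acc x => PySem.List.insertBy
      (fun (a b : String) => decide (toLex (k1 a, a) < toLex (k1 b, b))) x acc) [] xs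
  rw [h]

theorem builtin_sort_eq_partition (xs : List String) :
    builtin_sort xs
      = PySem.List.sorted (xs.filter (fun w => PySem.Str.startswith w "H")) (fun x => x)
        ++ PySem.List.sorted (xs.filter (fun w => !PySem.Str.startswith w "H")) (fun x => x) := by
  unfold builtin_sort
  rw [partition_foldl]
  simp

theorem both_perm (xs : List String) :
    (builtin_sort xs).Perm (builtin_sort_alt xs) := by
  have hb : (builtin_sort_alt xs).Perm xs := PySem.List.sorted2_perm ..
  have ha : (builtin_sort xs).Perm xs := by
    rw [builtin_sort_eq_partition]
    exact (List.Perm.append (PySem.List.sorted_perm ..) (PySem.List.sorted_perm ..)).trans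
      (List.filter_append_perm _ xs)
  exact ha.trans hb.symm

theorem pairwise_A (xs : List String) :
    (builtin_sort xs).Pairwise (fun a b => pvKey a ≤ pvKey b) := by
  rw [builtin_sort_eq_partition]
  rw [List.pairwise_append]
  refine ⟨?_, ?_, ?_⟩
  · refine (PySem.List.sorted_pairwise (xs.filter (fun w => PySem.Str.startswith w "H")) (fun x => x)).imp_of_mem ?_
    intro a b ha hb hab
    have ha' : PySem.Chars.startswith a.toList ['H'] = true := by
      simpa using (List.mem_filter.mp ((PySem.List.mem_sorted ..).mp ha)).2
    have hb' : PySem.Chars.startswith b.toList ['H'] = true := by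
      simpa using (List.mem_filter.mp ((PySem.List.mem_sorted ..).mp hb)).2
    simp [pvKey, Prod.Lex.le_iff, ha', hb', hab]
  · refine (PySem.List.sorted_pairwise (xs.filter (fun w => !PySem.Str.startswith w "H")) (fun x => x)).imp_of_mem ?_
    intro a b ha hb hab
    have ha' : PySem.Chars.startswith a.toList ['H'] = false := by
      simpa using (List.mem_filter.mp ((PySem.List.mem_sorted ..).mp ha)).2
    have hb' : PySem.Chars.startswith b.toList ['H'] = false := by
      simpa using (List.mem_filter.mp ((PySem.List.mem_sorted ..).mp hb)).2
    simp [pvKey, Prod.Lex.le_iff, ha', hb', hab]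
  · intro a ha b hb
    have ha' : PySem.Chars.startswith a.toList ['H'] = true := by
      simpa using (List.mem_filter.mp ((PySem.List.mem_sorted ..).mp ha)).2
    have hb' : PySem.Chars.startswith b.toList ['H'] = false := by
      simpa using (List.mem_filter.mp ((PySem.List.mem_sorted ..).mp hb)).2
    simp [pvKey, Prod.Lex.le_iff, Bool.lt_iff, ha', hb']

theorem pairwise_B (xs : List String) :
    (builtin_sort_alt xs).Pairwise (fun a b => pvKey a ≤ pvKey b) := by
  unfold builtin_sort_alt
  rw [sorted2_eq_sorted_lex]
  exact PySem.List.sorted_pairwise xs pvKey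

-- ===== VERDICT (by name: the statement is the Claim_ definition above) =====
theorem builtin_sort_spec : Claim_equal_builtin_sort := by
  intro xs _
  unfold Spec_builtin_sort
  exact PySem.List.eq_of_perm_of_pairwise_le_of_injective pvKey pvKey_injective
    (both_perm xs) (pairwise_A xs) (pairwise_B xs)
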